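-- pv_equiv track=rewrite | github.com/a43554/sail_web_server | interface/views/api/utils_progress_operations.py | is_status_progress_from_all_targets_str
-- ===== SOURCE A (Python) =====
-- from typing import Dict, List
--
-- def is_status_progress_from_all_targets_str(
--         target_section: str,
--         progress_dictionary: Dict[str, str],
--         status: str
-- ) -> bool:
--     # The verdict.
--     verdict = None
--     # Split the target section.
--     target_section_array = target_section.split('_')
--     # The target section array length.
--     target_section_array_length = len(target_section_array)
--     # Loop through each possible target.
--     for possible_target in progress_dictionary.keys():
--         # Split the string.
--         possible_target_array = possible_target.split('_')
--         # Check if the lengths match.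
--         if target_section_array_length == len(possible_target_array):
--             # Correct section.
--             is_correct_section = True
--             # Iterate the arrays.
--             for i in range(0, target_section_array_length):
--                 # Obtain both strings.
--                 actual_str, expected_str = target_section_array[i], possible_target_array[i]
--                 # Check if the strings match.
--                 if (expected_str != actual_str) and (actual_str != '*'):
--                     # Is not correct section.
--                     is_correct_section = False
--                     # Break out.
--                     break
--             # Check if it is correct section.
--             if is_correct_section:
--                 # Return the status.
--                 verdict = (verdict is None or verdict) and (progress_dictionary[possible_target] == status)
--     # Return the verdict.
--     return verdict == True
-- ===== SOURCE B (Python) =====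
-- def is_status_progress_from_all_targets_str(target_section, progress_dictionary, status):
--     tparts = target_section.split('_')
--     # Candidates: every key with its split, narrowed column by column.
--     cands = [(k, k.split('_')) for k in progress_dictionary]
--     cands = [kp for kp in cands if len(kp[1]) == len(tparts)]
--     for i in range(len(tparts)):
--         t = tparts[i]
--         if t != '*':
--             cands = [kp for kp in cands if kp[1][i] == t]
--     return bool(cands) and all(progress_dictionary[k] == status for k, _ in cands)
-- ===== Notes on version B (the rewrite author's own statement) =====
-- stated objective: alternative
-- what changed: Replaced A's per-key inner matching loop with an Option verdict accumulator by column-wise progressive filtering: a candidate list of (key, split) pairs is narrowed once per non-wildcard pattern position, then the surviving keys' values are checked against status.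
import Mathlib
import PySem

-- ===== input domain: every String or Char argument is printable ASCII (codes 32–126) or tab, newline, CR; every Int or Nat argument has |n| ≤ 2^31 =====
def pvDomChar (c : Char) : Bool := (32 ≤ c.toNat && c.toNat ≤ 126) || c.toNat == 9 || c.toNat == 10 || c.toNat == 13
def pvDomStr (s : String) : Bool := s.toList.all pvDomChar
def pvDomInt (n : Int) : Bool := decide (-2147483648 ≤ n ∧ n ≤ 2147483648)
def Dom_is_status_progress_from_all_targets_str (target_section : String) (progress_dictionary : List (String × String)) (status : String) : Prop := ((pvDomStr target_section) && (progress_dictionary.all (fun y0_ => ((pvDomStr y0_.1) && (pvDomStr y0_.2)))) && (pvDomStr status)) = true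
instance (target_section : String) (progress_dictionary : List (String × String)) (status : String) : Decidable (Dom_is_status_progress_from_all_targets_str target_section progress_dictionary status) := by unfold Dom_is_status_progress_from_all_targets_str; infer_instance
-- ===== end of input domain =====

-- B replaces A's per-key inner matching loop by column-wise progressive filtering of a
-- candidate list (one narrowing pass per non-wildcard pattern position): alternative.

-- s.split('_'): sep is nonempty, so PySem.Str.split? is always `some`; exact on all strings
def pvSplit (s : String) : List String := (PySem.Str.split? s "_").getD []

-- ===== PORT A =====
-- inner 'for i in range(0, target_section_array_length)' loop with its break
def pvAInner (ta pa : List String) (n i : Nat) : Bool :=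
  if i < n then
    let actual := ta.getD i ""
    let expected := pa.getD i ""
    if expected ≠ actual ∧ actual ≠ "*" then false
    else pvAInner ta pa n (i + 1)
  else true
termination_by n - i

def is_status_progress_from_all_targets_str (target_section : String) (progress_dictionary : List (String × String)) (status : String) : Bool :=
  let d := PySem.Dict.ofList progress_dictionary
  let target_section_array := pvSplit target_section
  let target_section_array_length := target_section_array.length
  let verdict := d.keys.foldl (fun (verdict : Option Bool) possible_target =>
    let possible_target_array := pvSplit possible_target
    if target_section_array_length == possible_target_array.length then
      if pvAInner target_section_array possible_target_array target_section_array_length 0 then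
        some ((verdict.getD true) && (d.getD possible_target "" == status))
      else verdict
    else verdict) none
  verdict == some true

-- ===== PORT B =====
def is_status_progress_from_all_targets_str_alt (target_section : String) (progress_dictionary : List (String × String)) (status : String) : Bool :=
  let d := PySem.Dict.ofList progress_dictionary
  let tparts := pvSplit target_section
  let cands0 := d.keys.map (fun k => (k, pvSplit k))
  let cands1 := cands0.filter (fun kp => kp.2.length == tparts.length)
  let cands2 := (List.range tparts.length).foldl (fun cs i =>
      let t := tparts.getD i ""
      if t ≠ "*" then cs.filter (fun kp => kp.2.getD i "" == t) else cs) cands1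
  !cands2.isEmpty && cands2.all (fun kp => d.getD kp.1 "" == status)

-- ===== PRECONDITION & SPEC =====
def Spec_is_status_progress_from_all_targets_str (target_section : String) (progress_dictionary : List (String × String)) (status : String) (out : Bool) : Prop := out = is_status_progress_from_all_targets_str_alt target_section progress_dictionary status
instance (target_section : String) (progress_dictionary : List (String × String)) (status : String) (out : Bool) : Decidable (Spec_is_status_progress_from_all_targets_str target_section progress_dictionary status out) := by unfold Spec_is_status_progress_from_all_targets_str; infer_instance

-- ===== CLAIM (what is proved, stated in full; the proofs are below) =====
def Claim_equal_is_status_progress_from_all_targets_str : Prop := ∀ (target_section : String) (progress_dictionary : List (String × String)) (status : String), Dom_is_status_progress_from_all_targets_str target_section progress_dictionary status → Spec_is_status_progress_from_all_targets_str target_section progress_dictionary status (is_status_progress_from_all_targets_str target_section progress_dictionary status)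

-- ===== LEMMAS AND PROOFS =====

-- the per-position match both sides decide at column i of target ta against key-split pa
def pvCol (ta pa : List String) (i : Nat) : Bool :=
  ta.getD i "" == "*" || pa.getD i "" == ta.getD i ""

-- A's inner loop from index i equals the conjunction of column checks over range' i (n-i)
theorem pvAInner_eq_all (ta pa : List String) (n i : Nat) :
    pvAInner ta pa n i = (List.range' i (n - i)).all (pvCol ta pa) := by
  rw [pvAInner]
  by_cases hi : i < n
  · have hr : n - i = (n - (i + 1)) + 1 := by omega
    rw [hr, List.range'_succ, List.all_cons]
    simp only [if_pos hi]
    by_cases hc : pa.getD i "" ≠ ta.getD i "" ∧ ta.getD i "" ≠ "*"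
    · rw [if_pos hc]
      obtain ⟨h1, h2⟩ := hc
      simp only [List.getD] at h1 h2
      have : pvCol ta pa i = false := by
        simp [pvCol, List.getD, h1, h2]
      simp [this]
    · rw [if_neg hc]
      have hh : pvCol ta pa i = true := by
        rcases not_and_or.mp hc with h1 | h2
        · simp only [ne_eq, not_not, List.getD] at h1
          simp [pvCol, List.getD, h1]
        · simp only [ne_eq, not_not, List.getD] at h2
          simp [pvCol, List.getD, h2]
      rw [pvAInner_eq_all ta pa n (i + 1), hh]
      simp
  · rw [if_neg hi]
    have : n - i = 0 := by omega
    simp [this]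
termination_by n - i

-- A's fold with the Option Bool accumulator, characterized by filter
theorem pvFoldA_eq (m chk : String → Bool) (ks : List String) (v : Option Bool) :
    ks.foldl (fun v k => if m k then some ((v.getD true) && chk k) else v) v
      = if (ks.filter m).isEmpty then v
        else some ((v.getD true) && (ks.filter m).all chk) := by
  induction ks generalizing v with
  | nil => simp
  | cons k ks ih =>
    by_cases hm : m k
    · simp only [List.foldl_cons, hm, if_pos, List.filter_cons_of_pos hm, List.isEmpty_cons, ih]
      by_cases he : (ks.filter m).isEmpty
      · simp [List.isEmpty_iff.mp he]
      · simp [he, Bool.and_assoc]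
    · simp [List.foldl_cons, hm, List.filter_cons_of_neg hm, ih]

-- B's staged filtering fold equals one filter by the conjunction of guarded column checks
theorem pvFoldB_eq {α : Type} (idxs : List Nat) (cs : List α)
    (g : Nat → Bool) (p : Nat → α → Bool) :
    idxs.foldl (fun cs i => if g i then cs.filter (p i) else cs) cs
      = cs.filter (fun x => idxs.all (fun i => !g i || p i x)) := by
  induction idxs generalizing cs with
  | nil => simp
  | cons i idxs ih =>
    by_cases hg : g i
    · simp only [List.foldl_cons, hg, if_pos, ih, List.filter_filter, List.all_cons]
      congr 1
      funext x
      simp [hg, Bool.and_comm]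
    · simp [List.foldl_cons, hg, ih]

-- the two ports agree on every input
theorem pvPort_eq (ts : String) (pd : List (String × String)) (st : String) :
    is_status_progress_from_all_targets_str ts pd st
      = is_status_progress_from_all_targets_str_alt ts pd st := by
  unfold is_status_progress_from_all_targets_str is_status_progress_from_all_targets_str_alt
  simp only []
  set d := PySem.Dict.ofList pd with hd
  set ta := pvSplit ts with hta
  set n := ta.length with hn
  -- the common per-key match predicate
  set m : String → Bool := fun k =>
    ((pvSplit k).length == n) && (List.range n).all (pvCol ta (pvSplit k)) with hm
  -- rewrite A's fold step
  have hstepA : (fun (verdict : Option Bool) possible_target =>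
      if n == (pvSplit possible_target).length then
        if pvAInner ta (pvSplit possible_target) n 0 then
          some ((verdict.getD true) && (d.getD possible_target "" == st))
        else verdict
      else verdict)
    = (fun (v : Option Bool) k =>
        if m k then some ((v.getD true) && (d.getD k "" == st)) else v) := by
    funext v k
    have hinner : pvAInner ta (pvSplit k) n 0 = (List.range n).all (pvCol ta (pvSplit k)) := by
      rw [pvAInner_eq_all, Nat.sub_zero, List.range_eq_range']
    by_cases hl : (pvSplit k).length = n
    · simp [hm, hl, hinner]
    · have h1 : ¬ n = (pvSplit k).length := fun h => hl h.symm
      simp [hm, hl, h1]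
  rw [hstepA, pvFoldA_eq]
  -- rewrite B's fold step to the Bool-guard shape and collapse it to one filter
  have hstepB : (fun (cs : List (String × List String)) i =>
      if ta.getD i "" ≠ "*" then cs.filter (fun kp => kp.2.getD i "" == ta.getD i "") else cs)
    = (fun (cs : List (String × List String)) i =>
        if !(ta.getD i "" == "*") then cs.filter (fun kp => kp.2.getD i "" == ta.getD i "") else cs) := by
    funext cs i
    by_cases h : ta.getD i "" = "*" <;> simp [h]
  rw [hstepB, pvFoldB_eq, List.filter_filter]
  -- the composed B filter over the mapped pairs is the A filter over the keys
  have hfil : (d.keys.map (fun k => (k, pvSplit k))).filter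
      (fun x => ((List.range n).all (fun i => !!(ta.getD i "" == "*") || (x.2.getD i "" == ta.getD i ""))) && (x.2.length == n))
    = (d.keys.filter m).map (fun k => (k, pvSplit k)) := by
    rw [List.filter_map]
    congr 1
    apply List.filter_congr
    intro k _
    simp only [hm, Function.comp]
    simp only [Bool.and_comm]
    congr 1
    congr 1
    funext i
    simp [pvCol, List.getD]
  rw [hfil]
  by_cases he : (d.keys.filter m).isEmpty
  · simp [he, List.isEmpty_iff.mp he]
  · simp only [he, if_neg, Bool.false_eq_true, not_false_eq_true]
    have hne : ¬ ((d.keys.filter m).map (fun k => (k, pvSplit k))).isEmpty := by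
      simpa using he
    simp [List.all_map, Function.comp, hne, List.isEmpty_iff]

-- ===== VERDICT =====
theorem is_status_progress_from_all_targets_str_spec : Claim_equal_is_status_progress_from_all_targets_str := by
  intro ts pd st _
  unfold Spec_is_status_progress_from_all_targets_str
  exact pvPort_eq ts pd st
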